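-- pv_equiv track=rewrite | github.com/noseglid/atom-language-haproxy | generate.py | parse_doubles
-- ===== SOURCE A (Python) =====
-- def parse_doubles(double):
--     m = dict()
--     for d in double:
--         splitted = d.split()
--         if splitted[0] in m:
--             m[splitted[0]].append(splitted[1])
--         else:
--             m[splitted[0]] = [splitted[1]]
--     return m
-- ===== SOURCE B (Python) =====
-- def parse_doubles(double):
--     toks = [d.split() for d in double]
--     keys = list(dict.fromkeys(t[0] for t in toks))
--     return {k: [t[1] for t in toks if t[0] == k] for k in keys}
-- ===== Notes on version B (the rewrite author's own statement) =====
-- stated objective: alternative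
-- what changed: Replaces the single dict-accumulation pass (check membership, append or create) with a two-phase decomposition: first split all lines, then collect the distinct first tokens in order, then build each key's value list by one comprehension over the splits.
import Mathlib
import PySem

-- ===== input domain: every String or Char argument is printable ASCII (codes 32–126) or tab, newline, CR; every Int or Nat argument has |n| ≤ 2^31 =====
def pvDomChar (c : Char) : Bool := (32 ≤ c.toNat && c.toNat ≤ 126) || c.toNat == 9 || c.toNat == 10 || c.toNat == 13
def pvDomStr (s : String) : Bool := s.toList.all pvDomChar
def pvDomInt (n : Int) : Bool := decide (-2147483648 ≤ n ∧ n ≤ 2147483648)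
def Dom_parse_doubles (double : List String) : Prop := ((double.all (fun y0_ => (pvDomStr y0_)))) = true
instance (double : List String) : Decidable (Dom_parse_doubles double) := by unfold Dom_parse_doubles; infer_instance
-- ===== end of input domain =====

-- B replaces A's single dict-accumulation pass with a two-phase decomposition
-- (split all, dedup keys, then one comprehension per key); objective: alternative.


-- ===== PORT A =====
-- literal port of A: one fold building a dict; splitted[0]/splitted[1] are total
-- via getD, exact under Pre_ (which guarantees at least two tokens).
def parse_doubles (double : List String) : List (String × List String) :=
  (double.foldl (fun m d =>
      let splitted := PySem.Str.split₀ d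
      if m.contains (splitted.getD 0 "") then
        m.modify (splitted.getD 0 "") [] (fun vs => vs ++ [splitted.getD 1 ""])
      else
        m.insert (splitted.getD 0 "") [splitted.getD 1 ""])
    PySem.Dict.empty).items

-- ===== PORT B =====
def parse_doubles_alt (double : List String) : List (String × List String) :=
  let toks := double.map (fun d => PySem.Str.split₀ d)
  let keys := PySem.List.dedup (toks.map (fun t => t.getD 0 ""))
  keys.map (fun k => (k, (toks.filter (fun t => t.getD 0 "" == k)).map (fun t => t.getD 1 "")))

-- ===== PRECONDITION & SPEC =====
-- Pre_ excludes exactly the inputs on which A raises IndexError: a line with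
-- fewer than two whitespace-separated tokens.
def Pre_parse_doubles (double : List String) : Prop :=
  ∀ d ∈ double, 2 ≤ (PySem.Str.split₀ d).length
instance (double : List String) : Decidable (Pre_parse_doubles double) := by unfold Pre_parse_doubles; infer_instance
def pvWitness_parse_doubles : List String := ["a b", "a c", "x y"]
def Spec_parse_doubles (double : List String) (out : List (String × List String)) : Prop := out = parse_doubles_alt double
instance (double : List String) (out : List (String × List String)) : Decidable (Spec_parse_doubles double out) := by unfold Spec_parse_doubles; infer_instance

-- ===== CLAIM (what is proved, stated in full; the proofs are below) =====
def Claim_equal_parse_doubles : Prop := ∀ (double : List String), Dom_parse_doubles double → Pre_parse_doubles double → Spec_parse_doubles double (parse_doubles double)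

-- ===== LEMMAS AND PROOFS =====

-- A's branch on membership is exactly Dict.modify with default [].
theorem step_eq_modify (m : PySem.Dict String (List String)) (k v : String) :
    (if m.contains k then m.modify k [] (fun vs => vs ++ [v]) else m.insert k [v])
      = m.modify k [] (fun vs => vs ++ [v]) := by
  split_ifs with h
  · rfl
  · have h0 : m.getD k [] = [] := by
      rw [PySem.Dict.getD_of_not_contains]
      simpa using h
    simp [PySem.Dict.modify, h0]

theorem parse_doubles_eq_alt (double : List String) :
    parse_doubles double = parse_doubles_alt double := by
  unfold parse_doubles parse_doubles_alt
  simp only [step_eq_modify]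
  have hmap :
      double.foldl
        (fun m d => m.modify ((PySem.Str.split₀ d).getD 0 "") []
          (fun vs => vs ++ [(PySem.Str.split₀ d).getD 1 ""]))
        PySem.Dict.empty
      = List.foldl (fun m p => m.modify p.1 [] (fun vs => vs ++ [p.2])) PySem.Dict.empty
          (double.map (fun d => ((PySem.Str.split₀ d).getD 0 "", (PySem.Str.split₀ d).getD 1 ""))) := by
    rw [List.foldl_map]
  rw [hmap]
  set pairs := double.map (fun d => ((PySem.Str.split₀ d).getD 0 "", (PySem.Str.split₀ d).getD 1 ""))
  have hnd : (pairs.foldl (fun m p => m.modify p.1 [] (fun vs => vs ++ [p.2])) PySem.Dict.empty).keys.Nodup := by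
    exact PySem.Dict.nodup_keys_foldl_modify_key pairs (·.1) [] (fun _ p => (fun vs => vs ++ [p.2])) _ PySem.Dict.nodup_keys_empty
  rw [PySem.Dict.items_eq_map_keys _ hnd []]
  have hkeys : (pairs.foldl (fun m p => m.modify p.1 [] (fun vs => vs ++ [p.2])) PySem.Dict.empty).keys
      = PySem.List.dedup (pairs.map (·.1)) := by
    rw [PySem.Dict.keys_foldl_modify_key pairs (·.1) [] (fun _ p => (fun vs => vs ++ [p.2]))]
    simp [PySem.Set.update, PySem.Set.ofList_eq_foldl, PySem.Dict.keys_empty, PySem.List.dedup_eq_ofList]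
  rw [hkeys]
  have hpk : pairs.map (·.1) = (double.map (fun d => PySem.Str.split₀ d)).map (fun t => t.getD 0 "") := by
    simp [pairs, List.map_map, Function.comp]
  rw [hpk]
  apply List.map_congr_left
  intro k _
  rw [PySem.Dict.getD_foldl_modify_append]
  simp only [pairs, PySem.Dict.getD_empty, List.filter_map, List.map_map, Function.comp_def,
    List.nil_append]

-- ===== VERDICT (by name: the statement is the Claim_ definition above) =====
theorem parse_doubles_spec : Claim_equal_parse_doubles := by
  intro double _ _
  exact parse_doubles_eq_alt double
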